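-- pv_equiv track=rewrite | github.com/fadimbarki87/Annual-Report-RAG-Agent | ingestion_pipeline/chunking/evaluate_chunking_quality.py | token_overlap_counts
-- ===== SOURCE A (Python) =====
-- from collections import Counter, defaultdict
--
-- def token_overlap_counts(reference_tokens: list[str], hypothesis_tokens: list[str]) -> tuple[int, int, int]:
--     reference_counter = Counter(reference_tokens)
--     hypothesis_counter = Counter(hypothesis_tokens)
--     matched = sum(
--         min(reference_counter[token], hypothesis_counter[token])
--         for token in reference_counter.keys() | hypothesis_counter.keys()
--     )
--     return matched, len(reference_tokens), len(hypothesis_tokens)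
-- ===== SOURCE B (Python) =====
-- from collections import Counter
--
-- def token_overlap_counts(reference_tokens: list[str], hypothesis_tokens: list[str]) -> tuple[int, int, int]:
--     counts = Counter(reference_tokens)
--     matched = 0
--     for token in hypothesis_tokens:
--         if counts[token] > 0:
--             matched += 1
--             counts[token] -= 1
--     return matched, len(reference_tokens), len(hypothesis_tokens)
-- ===== Notes on version B (the rewrite author's own statement) =====
-- stated objective: simpler
-- what changed: Replaces the two Counters and the min-reduction over the union of their key sets by a single consuming pass: one Counter of the reference only, decremented while scanning the hypothesis tokens once.
import Mathlib
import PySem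

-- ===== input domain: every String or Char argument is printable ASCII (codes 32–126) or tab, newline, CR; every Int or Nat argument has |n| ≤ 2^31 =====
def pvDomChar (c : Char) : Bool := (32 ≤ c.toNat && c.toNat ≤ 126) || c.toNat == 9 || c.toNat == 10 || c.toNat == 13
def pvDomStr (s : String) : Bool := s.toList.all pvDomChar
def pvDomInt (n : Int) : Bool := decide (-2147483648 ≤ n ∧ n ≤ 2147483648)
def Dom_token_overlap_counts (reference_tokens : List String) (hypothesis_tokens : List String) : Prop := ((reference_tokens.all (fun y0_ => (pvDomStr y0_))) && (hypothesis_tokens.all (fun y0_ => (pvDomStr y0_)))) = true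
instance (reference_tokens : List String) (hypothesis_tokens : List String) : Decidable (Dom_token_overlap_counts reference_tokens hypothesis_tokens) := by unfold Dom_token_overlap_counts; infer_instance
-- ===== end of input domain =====

-- B replaces A's two Counters and min-reduction over the union of key sets by one consuming
-- single pass over the hypothesis tokens (objective: simpler).


-- ===== PORT A =====
-- Python iterates the key-set union in hash order; the sum is order-independent, so this
-- iteration order is exact for the result.
def token_overlap_counts (reference_tokens : List String) (hypothesis_tokens : List String) : Int × Int × Int :=
  let reference_counter := PySem.Dict.counter reference_tokens
  let hypothesis_counter := PySem.Dict.counter hypothesis_tokens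
  let matched :=
    ((PySem.Set.union (PySem.Set.ofList reference_counter.keys) hypothesis_counter.keys).map
      (fun token => min (reference_counter.getD token 0) (hypothesis_counter.getD token 0))).sum
  (matched, (reference_tokens.length : Int), (hypothesis_tokens.length : Int))

-- ===== PORT B =====
def token_overlap_counts_alt (reference_tokens : List String) (hypothesis_tokens : List String) : Int × Int × Int :=
  let res := hypothesis_tokens.foldl
    (fun (acc : Int × PySem.Dict String Int) token =>
      if acc.2.getD token 0 > 0 then (acc.1 + 1, acc.2.modify token 0 (· - 1)) else acc)
    (0, PySem.Dict.counter reference_tokens)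
  (res.1, (reference_tokens.length : Int), (hypothesis_tokens.length : Int))

-- ===== PRECONDITION & SPEC =====
def Spec_token_overlap_counts (reference_tokens : List String) (hypothesis_tokens : List String) (out : Int × Int × Int) : Prop := out = token_overlap_counts_alt reference_tokens hypothesis_tokens
instance (reference_tokens : List String) (hypothesis_tokens : List String) (out : Int × Int × Int) : Decidable (Spec_token_overlap_counts reference_tokens hypothesis_tokens out) := by unfold Spec_token_overlap_counts; infer_instance

-- ===== CLAIM (what is proved, stated in full; the proofs are below) =====
def Claim_equal_token_overlap_counts : Prop := ∀ (reference_tokens : List String) (hypothesis_tokens : List String), Dom_token_overlap_counts reference_tokens hypothesis_tokens → Spec_token_overlap_counts reference_tokens hypothesis_tokens (token_overlap_counts reference_tokens hypothesis_tokens)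

-- ===== LEMMAS AND PROOFS =====

-- Summing a map over a nodup list after bumping the value at one member x by 1.
lemma sum_map_bump {α : Type} [DecidableEq α] (S : List α) (hS : S.Nodup) (x : α) (hx : x ∈ S)
    (f g : α → Int) (hne : ∀ t, t ≠ x → f t = g t) (hfx : f x = g x + 1) :
    (S.map f).sum = (S.map g).sum + 1 := by
  obtain ⟨s, t, rfl⟩ := List.append_of_mem hx
  have hnx : x ∉ s ∧ x ∉ t := by
    have h2 := List.Nodup.of_append_right hS
    refine ⟨fun hmem => (List.disjoint_of_nodup_append hS) hmem (by simp), ?_⟩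
    exact fun hmem => (List.nodup_cons.mp h2).1 hmem
  have hs' : s.map f = s.map g := List.map_congr_left (fun a ha => hne a (fun h => hnx.1 (h ▸ ha)))
  have ht' : t.map f = t.map g := List.map_congr_left (fun a ha => hne a (fun h => hnx.2 (h ▸ ha)))
  simp [hs', ht', hfx]
  ring

-- The consuming loop of B computes the sum of min(counter value, remaining count) over any
-- nodup list S covering the tokens of hs, provided the counter values are nonnegative.
lemma loopB {S : List String} (hS : S.Nodup) :
    ∀ (hs : List String) (c : PySem.Dict String Int) (m : Int),
      (∀ t ∈ hs, t ∈ S) → (∀ t, 0 ≤ c.getD t 0) →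
      (hs.foldl
        (fun (acc : Int × PySem.Dict String Int) token =>
          if acc.2.getD token 0 > 0 then (acc.1 + 1, acc.2.modify token 0 (· - 1)) else acc)
        (m, c)).1
        = m + (S.map (fun t => min (c.getD t 0) ((hs.count t : Int)))).sum := by
  intro hs
  induction hs with
  | nil =>
    intro c m _ hc
    have h0 : S.map (fun t => min (c.getD t 0) ((List.count t ([] : List String) : Int)))
        = S.map (fun _ => (0 : Int)) := by
      apply List.map_congr_left
      intro a _
      simp [min_eq_right (hc a)]
    rw [h0]
    simp
  | cons x rest ih =>
    intro c m hmem hc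
    simp only [List.foldl_cons]
    by_cases hx : c.getD x 0 > 0
    · simp only [hx, if_pos]
      have hc' : ∀ t, 0 ≤ (c.modify x 0 (· - 1)).getD t 0 := by
        intro t
        rw [PySem.Dict.getD_modify]
        split_ifs with h
        · subst h; omega
        · exact hc t
      rw [ih (c.modify x 0 (· - 1)) (m + 1) (fun t ht => hmem t (by simp [ht])) hc']
      have hbump :
          (S.map (fun t => min (c.getD t 0) ((List.count t (x :: rest) : Int)))).sum
            = (S.map (fun t => min ((c.modify x 0 (· - 1)).getD t 0) ((rest.count t : Int)))).sum + 1 := by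
        apply sum_map_bump S hS x (hmem x (by simp))
        · intro t htx
          rw [PySem.Dict.getD_modify, if_neg htx]
          simp [Ne.symm htx]
        · rw [PySem.Dict.getD_modify, if_pos rfl]
          simp only [List.count_cons, beq_self_eq_true, if_pos]
          push_cast
          omega
      rw [hbump]
      ring
    · simp only [hx, if_neg, not_false_iff]
      rw [ih c m (fun t ht => hmem t (by simp [ht])) hc]
      have hx0 : c.getD x 0 = 0 := le_antisymm (by omega) (hc x)
      have : S.map (fun t => min (c.getD t 0) ((List.count t (x :: rest) : Int)))
          = S.map (fun t => min (c.getD t 0) ((rest.count t : Int))) := by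
        apply List.map_congr_left
        intro a _
        by_cases hax : a = x
        · rw [hax, hx0]
          omega
        · simp [Ne.symm hax]
      rw [this]

-- ===== VERDICT (by name: the statement is the Claim_ definition above) =====
theorem token_overlap_counts_spec : Claim_equal_token_overlap_counts := by
  intro ref hyp _
  unfold Spec_token_overlap_counts token_overlap_counts token_overlap_counts_alt
  simp only
  -- the iteration set of A
  set U := PySem.Set.union (PySem.Set.ofList (PySem.Dict.counter ref).keys)
      (PySem.Dict.counter hyp).keys with hU
  have hUkeys : U = PySem.Set.union (PySem.Set.ofList ref) (PySem.Set.ofList hyp) := by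
    rw [hU, PySem.Dict.keys_counter, PySem.Dict.keys_counter, PySem.Set.ofList_ofList]
  have hUnodup : U.Nodup := by
    rw [hUkeys]; exact PySem.Set.nodup_union _ _ (PySem.Set.nodup_ofList _)
  have hhyp : ∀ t ∈ hyp, t ∈ U := by
    intro t ht
    rw [hUkeys]
    exact (PySem.Set.mem_union _ _ _).mpr (Or.inr ((PySem.Set.mem_ofList _ _).mpr ht))
  have hc : ∀ t, 0 ≤ (PySem.Dict.counter ref).getD t 0 := by
    intro t; rw [PySem.Dict.getD_counter]; positivity
  rw [Prod.ext_iff]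
  refine ⟨?_, rfl⟩
  rw [loopB hUnodup hyp (PySem.Dict.counter ref) 0 hhyp hc]
  simp only [zero_add]
  congr 1
  apply List.map_congr_left
  intro t _
  rw [PySem.Dict.getD_counter, PySem.Dict.getD_counter]
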